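-- pv_equiv track=rewrite | github.com/Tommaso-R-Marena/ChiralFold | run_benchmark.py | l_peptide_smiles
-- ===== SOURCE A (Python) =====
-- D_SC = {
--     'G':None, 'A':'C','V':'C(C)C','L':'CC(C)C','I':'[C@H](CC)C',
--     'P':None,'F':'Cc1ccccc1','W':'Cc1c[nH]c2ccccc12','M':'CCSC',
--     'S':'CO','T':'[C@@H](O)C','C':'CS','Y':'Cc1ccc(O)cc1',
--     'N':'CC(=O)N','Q':'CCC(=O)N','D':'CC(=O)O','E':'CCC(=O)O',
--     'K':'CCCCN','R':'CCCNC(=N)N','H':'Cc1c[nH]cn1',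
-- }
--
-- def l_peptide_smiles(seq):
--     L_SC=dict(D_SC); L_SC['I']='[C@@H](CC)C'; L_SC['T']='[C@H](O)C'
--     parts=[]
--     for i,aa in enumerate(seq):
--         last=(i==len(seq)-1)
--         if aa=='G':
--             parts.append('NCC(=O)O' if last else 'NCC(=O)')
--         elif aa=='P':
--             parts.append('N1CCC[C@H]1C(=O)O' if last else 'N1CCC[C@H]1C(=O)')
--         else:
--             sc=L_SC[aa]
--             parts.append(f'N[C@@H]({sc})C(=O)O' if last else f'N[C@@H]({sc})C(=O)')
--     return ''.join(parts)
-- ===== SOURCE B (Python) =====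
-- # B: one lookup table of full non-terminal fragments per residue; join them and append the single terminal 'O'.
-- FRAG = {
--     'G': 'NCC(=O)', 'P': 'N1CCC[C@H]1C(=O)',
--     'A': 'N[C@@H](C)C(=O)', 'V': 'N[C@@H](C(C)C)C(=O)', 'L': 'N[C@@H](CC(C)C)C(=O)',
--     'I': 'N[C@@H]([C@@H](CC)C)C(=O)', 'F': 'N[C@@H](Cc1ccccc1)C(=O)',
--     'W': 'N[C@@H](Cc1c[nH]c2ccccc12)C(=O)', 'M': 'N[C@@H](CCSC)C(=O)',
--     'S': 'N[C@@H](CO)C(=O)', 'T': 'N[C@@H]([C@H](O)C)C(=O)', 'C': 'N[C@@H](CS)C(=O)',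
--     'Y': 'N[C@@H](Cc1ccc(O)cc1)C(=O)', 'N': 'N[C@@H](CC(=O)N)C(=O)',
--     'Q': 'N[C@@H](CCC(=O)N)C(=O)', 'D': 'N[C@@H](CC(=O)O)C(=O)',
--     'E': 'N[C@@H](CCC(=O)O)C(=O)', 'K': 'N[C@@H](CCCCN)C(=O)',
--     'R': 'N[C@@H](CCCNC(=N)N)C(=O)', 'H': 'N[C@@H](Cc1c[nH]cn1)C(=O)',
-- }
--
-- def l_peptide_smiles(seq):
--     if not seq:
--         return ''
--     return ''.join(FRAG[aa] for aa in seq) + 'O'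
-- ===== Notes on version B (the rewrite author's own statement) =====
-- stated objective: simpler
-- what changed: B replaces A's per-residue if/elif branching, L-override dict mutation and last-index check inside the loop by one precomputed full-fragment table joined in one pass with the single terminal hydroxyl oxygen appended at the end.
import Mathlib
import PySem

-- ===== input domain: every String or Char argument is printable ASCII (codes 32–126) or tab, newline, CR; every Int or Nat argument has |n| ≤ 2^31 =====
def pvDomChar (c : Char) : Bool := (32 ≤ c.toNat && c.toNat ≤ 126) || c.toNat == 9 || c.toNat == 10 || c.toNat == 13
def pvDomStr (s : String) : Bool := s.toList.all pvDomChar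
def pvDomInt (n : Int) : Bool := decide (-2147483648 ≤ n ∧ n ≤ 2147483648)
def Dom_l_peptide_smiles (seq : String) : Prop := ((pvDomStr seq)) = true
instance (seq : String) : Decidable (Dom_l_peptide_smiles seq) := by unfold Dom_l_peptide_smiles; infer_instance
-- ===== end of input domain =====

-- B replaces A's per-residue branching (and L_SC override mutation) by one full-fragment table,
-- joined in one pass with the single terminal hydroxyl oxygen appended at the end; objective: simpler. A and B both raise KeyError
-- on residues outside the 20 standard one-letter codes, which Pre_ excludes.

-- ===== PORT A =====
-- L_SC after the two overrides (I, T); none = key absent or value None (G, P never looked up).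
def pvLSC (aa : Char) : Option String :=
  match aa with
  | 'A' => some "C" | 'V' => some "C(C)C" | 'L' => some "CC(C)C"
  | 'I' => some "[C@@H](CC)C" | 'F' => some "Cc1ccccc1"
  | 'W' => some "Cc1c[nH]c2ccccc12" | 'M' => some "CCSC"
  | 'S' => some "CO" | 'T' => some "[C@H](O)C" | 'C' => some "CS"
  | 'Y' => some "Cc1ccc(O)cc1" | 'N' => some "CC(=O)N" | 'Q' => some "CCC(=O)N"
  | 'D' => some "CC(=O)O" | 'E' => some "CCC(=O)O" | 'K' => some "CCCCN"
  | 'R' => some "CCCNC(=N)N" | 'H' => some "Cc1c[nH]cn1"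
  | _ => none

def pvPieceA (last : Bool) (aa : Char) : String :=
  if aa = 'G' then (if last then "NCC(=O)O" else "NCC(=O)")
  else if aa = 'P' then (if last then "N1CCC[C@H]1C(=O)O" else "N1CCC[C@H]1C(=O)")
  else
    match pvLSC aa with
    | some sc => if last then "N[C@@H](" ++ sc ++ ")C(=O)O" else "N[C@@H](" ++ sc ++ ")C(=O)"
    | none => ""   -- KeyError in Python; unreachable under Pre_

def l_peptide_smiles (seq : String) : String :=
  let cs := seq.toList
  let n : Int := cs.length
  let parts : List String :=
    (PySem.List.enumerate cs).foldl (fun parts p => parts ++ [pvPieceA (p.1 == n - 1) p.2]) []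
  PySem.Str.join "" parts

-- ===== PORT B =====
-- the FRAG table of Source B (KeyError → "", unreachable under Pre_)
def pvFrag (aa : Char) : String :=
  match aa with
  | 'G' => "NCC(=O)" | 'P' => "N1CCC[C@H]1C(=O)"
  | 'A' => "N[C@@H](C)C(=O)" | 'V' => "N[C@@H](C(C)C)C(=O)" | 'L' => "N[C@@H](CC(C)C)C(=O)"
  | 'I' => "N[C@@H]([C@@H](CC)C)C(=O)" | 'F' => "N[C@@H](Cc1ccccc1)C(=O)"
  | 'W' => "N[C@@H](Cc1c[nH]c2ccccc12)C(=O)" | 'M' => "N[C@@H](CCSC)C(=O)"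
  | 'S' => "N[C@@H](CO)C(=O)" | 'T' => "N[C@@H]([C@H](O)C)C(=O)" | 'C' => "N[C@@H](CS)C(=O)"
  | 'Y' => "N[C@@H](Cc1ccc(O)cc1)C(=O)" | 'N' => "N[C@@H](CC(=O)N)C(=O)"
  | 'Q' => "N[C@@H](CCC(=O)N)C(=O)" | 'D' => "N[C@@H](CC(=O)O)C(=O)"
  | 'E' => "N[C@@H](CCC(=O)O)C(=O)" | 'K' => "N[C@@H](CCCCN)C(=O)"
  | 'R' => "N[C@@H](CCCNC(=N)N)C(=O)" | 'H' => "N[C@@H](Cc1c[nH]cn1)C(=O)"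
  | _ => ""

def l_peptide_smiles_alt (seq : String) : String :=
  let cs := seq.toList
  if cs.isEmpty then ""
  else PySem.Str.join "" (cs.map pvFrag) ++ "O"

-- ===== PRECONDITION & SPEC =====
def pvAAKeys : List Char := ['G','A','V','L','I','P','F','W','M','S','T','C','Y','N','Q','D','E','K','R','H']

-- Pre_ excludes exactly the sequences with a residue outside the 20 standard codes, where A raises KeyError.
def Pre_l_peptide_smiles (seq : String) : Prop := seq.toList.all (fun c => pvAAKeys.contains c) = true
instance (seq : String) : Decidable (Pre_l_peptide_smiles seq) := by unfold Pre_l_peptide_smiles; infer_instance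
def pvWitness_l_peptide_smiles : String := "GAP"

def Spec_l_peptide_smiles (seq : String) (out : String) : Prop := out = l_peptide_smiles_alt seq
instance (seq : String) (out : String) : Decidable (Spec_l_peptide_smiles seq out) := by unfold Spec_l_peptide_smiles; infer_instance

-- ===== CLAIM (what is proved, stated in full; the proofs are below) =====
def Claim_equal_l_peptide_smiles : Prop := ∀ (seq : String), Dom_l_peptide_smiles seq → Pre_l_peptide_smiles seq → Spec_l_peptide_smiles seq (l_peptide_smiles seq)

-- ===== LEMMAS AND PROOFS =====

-- A's loop, abstracted: the last element gets the terminal piece.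
def pvPieces : List Char → List String
  | [] => []
  | [a] => [pvPieceA true a]
  | a :: b :: r => pvPieceA false a :: pvPieces (b :: r)

theorem pvFoldA (cs : List Char) : ∀ (i n : Int) (acc : List String), i + cs.length = n →
    (PySem.List.enumerate cs i).foldl (fun parts p => parts ++ [pvPieceA (p.1 == n - 1) p.2]) acc
      = acc ++ pvPieces cs := by
  induction cs with
  | nil => intro i n acc h; simp [PySem.List.enumerate_nil, pvPieces]
  | cons a rest ih =>
    intro i n acc h
    cases rest with
    | nil =>
      have : (i == n - 1) = true := by simp at h ⊢; omega
      simp [PySem.List.enumerate_cons, PySem.List.enumerate_nil, pvPieces, this]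
    | cons b r =>
      have hne : (i == n - 1) = false := by
        simp only [List.length_cons] at h; simp; push_cast at h ⊢; omega
      rw [PySem.List.enumerate_cons, List.foldl_cons,
        ih (i + 1) n _ (by simp only [List.length_cons] at h ⊢; push_cast at h ⊢; omega)]
      simp [pvPieces, hne]

-- each in-table terminal piece is the non-terminal piece plus 'O'
theorem pvPiece_last (a : Char) (ha : a ∈ pvAAKeys) :
    pvPieceA true a = pvPieceA false a ++ "O" := by
  fin_cases ha <;> decide

theorem pvPiece_frag (a : Char) (ha : a ∈ pvAAKeys) :
    pvPieceA false a = pvFrag a := by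
  fin_cases ha <;> decide

theorem join_empty_cons (x : String) (l : List String) :
    PySem.Str.join "" (x :: l) = x ++ PySem.Str.join "" l := by
  apply String.toList_inj.mp
  cases l <;> simp [PySem.Str.join, PySem.Chars.join, List.intercalate]

theorem join_empty_nil : PySem.Str.join "" ([] : List String) = "" := by
  apply String.toList_inj.mp
  simp [PySem.Str.join, PySem.Chars.join, List.intercalate]

theorem pvJoin_pieces (cs : List Char) (h : ∀ c ∈ cs, c ∈ pvAAKeys) (hne : cs ≠ []) :
    PySem.Str.join "" (pvPieces cs) = PySem.Str.join "" (cs.map pvFrag) ++ "O" := by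
  induction cs with
  | nil => exact absurd rfl hne
  | cons a rest ih =>
    have ha := h a (by simp)
    cases rest with
    | nil =>
      simp [pvPieces, join_empty_cons, join_empty_nil, pvPiece_last a ha, pvPiece_frag a ha]
    | cons b r =>
      rw [pvPieces, join_empty_cons, ih (fun c hc => h c (by simp [hc])) (by simp),
        List.map_cons, join_empty_cons, pvPiece_frag a ha, String.append_assoc]
      simp [join_empty_cons, String.append_assoc]

-- ===== VERDICT (by name: the statement is the Claim_ definition above) =====
theorem l_peptide_smiles_spec : Claim_equal_l_peptide_smiles := by
  intro seq _ hpre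
  have hpre' : ∀ c ∈ seq.toList, c ∈ pvAAKeys := by
    simpa [Pre_l_peptide_smiles, List.all_eq_true] using hpre
  unfold Spec_l_peptide_smiles l_peptide_smiles l_peptide_smiles_alt
  by_cases hnil : seq.toList = []
  · simp [hnil, PySem.List.enumerate_nil, PySem.Str.join, PySem.Chars.join, List.intercalate]
  · simp only [List.isEmpty_eq_false_iff.mpr hnil]
    rw [pvFoldA seq.toList 0 seq.toList.length [] (by simp), List.nil_append,
      pvJoin_pieces seq.toList hpre' hnil]
    simp
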